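-- pv_equiv track=rewrite | github.com/sagemath/sage-archive-2023-02-01 | src/sage/combinat/parallelogram_polyomino.py | _prefix_lengths
-- ===== SOURCE A (Python) =====
-- def _prefix_lengths(word, up):
--     r"""
--     Convert a word to a list of lengths using the following algorithm:
--
--     1) convert each 1-``up`` letter of the word by the number of ``up``
--        located on the left in the word;
--     2) remove all the ``up`` letters and return the resulting list of
--        integers.
--
--     INPUT:
--
--     - ``word`` -- a word of 0 and 1.
--
--     - ``up`` -- 0 or 1 (a letter of the word)
--
--     OUTPUT:
--
--     A list of integers
--
--     EXAMPLES::
--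
--         sage: ParallelogramPolyomino._prefix_lengths([], 1)
--         []
--         sage: ParallelogramPolyomino._prefix_lengths([], 0)
--         []
--         sage: ParallelogramPolyomino._prefix_lengths([1,1,0,1,0,0,1], 1)
--         [2, 3, 3]
--         sage: ParallelogramPolyomino._prefix_lengths([1,1,0,1,0,0,1], 0)
--         [0, 0, 1, 3]
--     """
--     res = []
--     h = 0
--     for e in word:
--         if e == up:
--             h += 1
--         else:
--             res.append(h)
--     return res
-- ===== SOURCE B (Python) =====
-- def _prefix_lengths(word, up):
--     # Two-pass: build the prefix-count array of `up` letters, then select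
--     # the entries at non-`up` positions.
--     cum = []
--     t = 0
--     for e in word:
--         t += 1 if e == up else 0
--         cum.append(t)
--     return [c for e, c in zip(word, cum) if e != up]
-- ===== Notes on version B (the rewrite author's own statement) =====
-- stated objective: alternative
-- what changed: Replaces the single interleaved count-and-append loop by a two-pass decomposition: first materialize the prefix-count array of up letters, then a separate selection pass over zip(word, cum) keeps the counts at non-up positions.
import Mathlib
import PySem

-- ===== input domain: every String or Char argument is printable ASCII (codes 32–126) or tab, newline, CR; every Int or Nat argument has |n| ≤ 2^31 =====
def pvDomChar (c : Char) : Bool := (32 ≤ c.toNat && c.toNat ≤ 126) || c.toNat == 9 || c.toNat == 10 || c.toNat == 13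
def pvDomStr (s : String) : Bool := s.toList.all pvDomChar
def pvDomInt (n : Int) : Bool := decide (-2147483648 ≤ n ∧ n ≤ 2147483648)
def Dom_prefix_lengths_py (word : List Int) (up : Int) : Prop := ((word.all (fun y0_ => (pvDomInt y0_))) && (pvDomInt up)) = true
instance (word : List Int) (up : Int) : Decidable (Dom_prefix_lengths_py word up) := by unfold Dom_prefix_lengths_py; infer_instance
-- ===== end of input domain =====

-- ===== PORT A =====
-- B decomposes A's single loop into: prefix-count array + a selection pass (alternative decomposition, same cost).
def prefix_lengths_py (word : List Int) (up : Int) : List Int :=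
  (word.foldl (fun (st : List Int × Int) e =>
    if e == up then (st.1, st.2 + 1) else (st.1 ++ [st.2], st.2)) ([], 0)).1

-- ===== PORT B =====
def pvCum (word : List Int) (up : Int) : List Int :=
  (word.foldl (fun (st : List Int × Int) e =>
    let t := st.2 + (if e == up then 1 else 0); (st.1 ++ [t], t)) ([], 0)).1

def prefix_lengths_py_alt (word : List Int) (up : Int) : List Int :=
  ((word.zip (pvCum word up)).filter (fun p => p.1 != up)).map (·.2)

-- ===== PRECONDITION & SPEC =====
def Spec_prefix_lengths_py (word : List Int) (up : Int) (out : List Int) : Prop := out = prefix_lengths_py_alt word up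
instance (word : List Int) (up : Int) (out : List Int) : Decidable (Spec_prefix_lengths_py word up out) := by unfold Spec_prefix_lengths_py; infer_instance

-- ===== CLAIM (what is proved, stated in full; the proofs are below) =====
def Claim_equal_prefix_lengths_py : Prop := ∀ (word : List Int) (up : Int), Dom_prefix_lengths_py word up → Spec_prefix_lengths_py word up (prefix_lengths_py word up)

-- ===== LEMMAS AND PROOFS =====

-- recursive characterisation of A's loop
def pvG (up : Int) : List Int → Int → List Int
  | [], _ => []
  | e :: w, h => if e == up then pvG up w (h + 1) else h :: pvG up w h

theorem pvA_foldl (up : Int) (word : List Int) : ∀ (acc : List Int) (h : Int),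
    (word.foldl (fun (st : List Int × Int) e =>
      if e == up then (st.1, st.2 + 1) else (st.1 ++ [st.2], st.2)) (acc, h)).1
    = acc ++ pvG up word h := by
  induction word with
  | nil => intro acc h; simp [pvG]
  | cons e w ih =>
    intro acc h
    by_cases he : e == up
    · simpa [List.foldl, he, pvG] using ih acc (h + 1)
    · simpa [List.foldl, he, pvG] using ih (acc ++ [h]) h

-- recursive characterisation of the prefix-count array
def pvCums (up : Int) : List Int → Int → List Int
  | [], _ => []
  | e :: w, t =>
    let t' := t + (if e == up then 1 else 0)
    t' :: pvCums up w t'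

theorem pvCum_foldl (up : Int) (word : List Int) : ∀ (acc : List Int) (t : Int),
    (word.foldl (fun (st : List Int × Int) e =>
      let t := st.2 + (if e == up then 1 else 0); (st.1 ++ [t], t)) (acc, t)).1
    = acc ++ pvCums up word t := by
  induction word with
  | nil => intro acc t; simp [pvCums]
  | cons e w ih =>
    intro acc t
    simpa [List.foldl, pvCums] using ih (acc ++ [t + (if e == up then 1 else 0)]) (t + (if e == up then 1 else 0))

theorem pvSelect_eq_pvG (up : Int) (word : List Int) : ∀ (t : Int),
    ((word.zip (pvCums up word t)).filter (fun p => p.1 != up)).map (·.2)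
    = pvG up word t := by
  induction word with
  | nil => intro t; simp [pvCums, pvG]
  | cons e w ih =>
    intro t
    by_cases he : e = up
    · simpa [pvCums, pvG, he, List.zip, List.filter_cons, he] using ih (t + 1)
    · simpa [pvCums, pvG, he, List.zip, List.filter_cons, he] using ih t

-- ===== VERDICT (by name: the statement is the Claim_ definition above) =====
theorem prefix_lengths_py_spec : Claim_equal_prefix_lengths_py := by
  intro word up _
  unfold Spec_prefix_lengths_py prefix_lengths_py prefix_lengths_py_alt pvCum
  rw [pvA_foldl, pvCum_foldl]
  simpa using (pvSelect_eq_pvG up word 0).symm
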